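-- pv_equiv track=rewrite | github.com/QuBenhao/LeetCode | problems/1670/solution.py | solve
-- ===== SOURCE A (Python) =====
-- from collections import deque
--
-- def solve(test_input=None):
--     ops, vals = test_input
--     ans = [None]
--
--     # Your FrontMiddleBackQueue object will be instantiated and called as such:
--     obj = FrontMiddleBackQueue()
--     # obj.pushFront(val)
--     # obj.pushMiddle(val)
--     # obj.pushBack(val)
--     # param_4 = obj.popFront()
--     # param_5 = obj.popMiddle()
--     # param_6 = obj.popBack()
--
--     for i in range(1, len(ops)):
--         if ops[i] == "pushFront":
--             obj.pushFront(vals[i][0])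
--             ans.append(None)
--         elif ops[i] == "pushMiddle":
--             obj.pushMiddle(vals[i][0])
--             ans.append(None)
--         elif ops[i] == "pushBack":
--             obj.pushBack(vals[i][0])
--             ans.append(None)
--         elif ops[i] == "popFront":
--             ans.append(obj.popFront())
--         elif ops[i] == "popMiddle":
--             ans.append(obj.popMiddle())
--         else:
--             ans.append(obj.popBack())
--     return ans
--
-- class FrontMiddleBackQueue(object):
--     def __init__(self):
--         self.front = deque([])
--         self.back = deque([])
--
--     def pushFront(self, val: int) -> None:
--         self.front.appendleft(val)
--         self.balance()
--
--     def pushMiddle(self, val: int) -> None: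
--         self.front.append(val)
--         self.balance()
--
--     def pushBack(self, val: int) -> None:
--         self.back.append(val)
--         self.balance()
--
--     def popFront(self) -> int:
--         if not self.front and not self.back:
--             return -1
--         if self.front:
--             val = self.front.popleft()
--         else:
--             val = self.back.popleft()
--         self.balance()
--         return val
--
--     def popMiddle(self) -> int:
--         if not self.front and not self.back:
--             return -1
--         if len(self.front) >= len(self.back):
--             val = self.front.pop()
--         else:
--             val = self.back.popleft()
--         self.balance()
--         return val
--
--     def popBack(self) -> int:
--         if not self.front and not self.back:
--             return -1
--         if self.back:
--             val = self.back.pop()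
--         else:
--             val = self.front.pop()
--         self.balance()
--         return val
--
--     def balance(self):
--         while len(self.back) > len(self.front) + 1:
--             self.front.append(self.back.popleft())
--         while len(self.front) > len(self.back):
--             self.back.appendleft(self.front.pop())
-- ===== SOURCE B (Python) =====
-- def solve(test_input=None):
--     ops, vals = test_input
--     ans = [None]
--     q = []
--     for i in range(1, len(ops)):
--         op = ops[i]
--         if op == "pushFront":
--             q.insert(0, vals[i][0])
--             ans.append(None)
--         elif op == "pushMiddle":
--             q.insert(len(q) // 2, vals[i][0])
--             ans.append(None)
--         elif op == "pushBack":
--             q.append(vals[i][0])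
--             ans.append(None)
--         elif op == "popFront":
--             ans.append(q.pop(0) if q else -1)
--         elif op == "popMiddle":
--             ans.append(q.pop((len(q) - 1) // 2) if q else -1)
--         else:
--             ans.append(q.pop() if q else -1)
--     return ans
-- ===== Notes on version B (the rewrite author's own statement) =====
-- stated objective: simpler
-- what changed: Replaced the two-deque FrontMiddleBackQueue class (with its rebalancing loops) by a single Python list indexed at 0, len//2, (len-1)//2 and -1 for the six operations; the driver loop is kept.
import Mathlib
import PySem

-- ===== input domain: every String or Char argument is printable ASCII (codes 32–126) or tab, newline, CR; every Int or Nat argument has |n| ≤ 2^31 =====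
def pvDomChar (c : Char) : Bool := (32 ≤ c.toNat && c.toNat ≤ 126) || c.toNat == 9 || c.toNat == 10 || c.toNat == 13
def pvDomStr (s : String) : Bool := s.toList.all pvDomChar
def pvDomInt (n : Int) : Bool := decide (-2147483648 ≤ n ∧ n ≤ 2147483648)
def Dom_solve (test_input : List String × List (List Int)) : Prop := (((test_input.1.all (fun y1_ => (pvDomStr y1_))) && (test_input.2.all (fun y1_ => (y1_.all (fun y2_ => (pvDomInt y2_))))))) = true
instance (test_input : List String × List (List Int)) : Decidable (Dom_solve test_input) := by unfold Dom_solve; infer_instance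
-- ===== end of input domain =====

-- B replaces A's two-deque FrontMiddleBackQueue with a single list indexed at 0, len//2, (len-1)//2 and -1 (simpler; same cost class on these inputs).
-- vals[i][0], shared by both drivers; Pre_solve guarantees the lookups succeed (Python raises IndexError otherwise).
def pvVal (vals : List (List Int)) (i : Int) : Int :=
  (((PySem.List.pyGet? vals i).bind fun l => PySem.List.pyGet? l 0).getD 0)

-- ===== PORT A =====
-- while len(back) > len(front) + 1: front.append(back.popleft())
def bal1 : List Int → List Int → List Int × List Int
  | f, [] => (f, [])
  | f, x :: bt => if f.length + 1 < (x :: bt).length then bal1 (f ++ [x]) bt else (f, x :: bt)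

-- while len(front) > len(back): back.appendleft(front.pop())
def bal2 (f b : List Int) : List Int × List Int :=
  if _h : b.length < f.length then bal2 f.dropLast (f.getLastD 0 :: b) else (f, b)
  termination_by f.length
  decreasing_by simp [List.length_dropLast]; omega

def balance (f b : List Int) : List Int × List Int :=
  let p := bal1 f b
  bal2 p.1 p.2

def stepA (ops : List String) (vals : List (List Int)) (st : List Int × List Int × List (Option Int)) (i : Int) :
    List Int × List Int × List (Option Int) :=
  let f := st.1; let b := st.2.1; let ans := st.2.2
  let op := (PySem.List.pyGet? ops i).getD ""
  if op = "pushFront" then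
    let p := balance (pvVal vals i :: f) b
    (p.1, p.2, ans ++ [none])
  else if op = "pushMiddle" then
    let p := balance (f ++ [pvVal vals i]) b
    (p.1, p.2, ans ++ [none])
  else if op = "pushBack" then
    let p := balance f (b ++ [pvVal vals i])
    (p.1, p.2, ans ++ [none])
  else if op = "popFront" then
    if f = [] ∧ b = [] then (f, b, ans ++ [some (-1)])
    else if f ≠ [] then
      let p := balance f.tail b
      (p.1, p.2, ans ++ [some (f.headD 0)])
    else
      let p := balance f b.tail
      (p.1, p.2, ans ++ [some (b.headD 0)])
  else if op = "popMiddle" then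
    if f = [] ∧ b = [] then (f, b, ans ++ [some (-1)])
    else if b.length ≤ f.length then
      let p := balance f.dropLast b
      (p.1, p.2, ans ++ [some (f.getLastD 0)])
    else
      let p := balance f b.tail
      (p.1, p.2, ans ++ [some (b.headD 0)])
  else
    if f = [] ∧ b = [] then (f, b, ans ++ [some (-1)])
    else if b ≠ [] then
      let p := balance f b.dropLast
      (p.1, p.2, ans ++ [some (b.getLastD 0)])
    else
      let p := balance f.dropLast b
      (p.1, p.2, ans ++ [some (f.getLastD 0)])

def solve (test_input : List String × List (List Int)) : List (Option Int) :=
  let ops := test_input.1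
  let vals := test_input.2
  ((PySem.List.pyRange 1 (ops.length : Int) 1).foldl (stepA ops vals) ([], [], [none])).2.2

-- ===== PORT B =====
def stepB (ops : List String) (vals : List (List Int)) (st : List Int × List (Option Int)) (i : Int) :
    List Int × List (Option Int) :=
  let q := st.1; let ans := st.2
  let op := (PySem.List.pyGet? ops i).getD ""
  if op = "pushFront" then (PySem.List.insert q 0 (pvVal vals i), ans ++ [none])
  else if op = "pushMiddle" then
    (PySem.List.insert q (PySem.Int.floordiv (q.length : Int) 2) (pvVal vals i), ans ++ [none])
  else if op = "pushBack" then (q ++ [pvVal vals i], ans ++ [none])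
  else if op = "popFront" then
    if q = [] then (q, ans ++ [some (-1)])
    else let r := (PySem.List.pop? q 0).getD (-1, []); (r.2, ans ++ [some r.1])
  else if op = "popMiddle" then
    if q = [] then (q, ans ++ [some (-1)])
    else let r := (PySem.List.pop? q (PySem.Int.floordiv ((q.length : Int) - 1) 2)).getD (-1, []); (r.2, ans ++ [some r.1])
  else
    if q = [] then (q, ans ++ [some (-1)])
    else let r := (PySem.List.pop? q (-1)).getD (-1, []); (r.2, ans ++ [some r.1])

def solve_alt (test_input : List String × List (List Int)) : List (Option Int) :=
  let ops := test_input.1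
  let vals := test_input.2
  ((PySem.List.pyRange 1 (ops.length : Int) 1).foldl (stepB ops vals) ([], [none])).2

-- ===== PRECONDITION & SPEC =====
-- Pre_solve excludes exactly the inputs on which Python A raises IndexError: a push opcode at a
-- position i where vals has no entry i or vals[i] is empty (vals[i][0] fails).
def Pre_solve (test_input : List String × List (List Int)) : Prop :=
  ∀ i : Nat, i < test_input.1.length → 1 ≤ i →
    (test_input.1.getD i "" = "pushFront" ∨ test_input.1.getD i "" = "pushMiddle" ∨
      test_input.1.getD i "" = "pushBack") →
    i < test_input.2.length ∧ test_input.2.getD i [] ≠ []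
instance (test_input : List String × List (List Int)) : Decidable (Pre_solve test_input) := by
  unfold Pre_solve; infer_instance

def pvWitness_solve : (List String × List (List Int)) :=
  (["FrontMiddleBackQueue", "pushBack", "pushMiddle", "popFront", "popMiddle", "popBack"],
   [[], [1], [2], [], [], []])

def Spec_solve (test_input : List String × List (List Int)) (out : List (Option Int)) : Prop := out = solve_alt test_input
instance (test_input : List String × List (List Int)) (out : List (Option Int)) : Decidable (Spec_solve test_input out) := by unfold Spec_solve; infer_instance

-- ===== CLAIM (what is proved, stated in full; the proofs are below) =====
def Claim_equal_solve : Prop := ∀ (test_input : List String × List (List Int)), Dom_solve test_input → Pre_solve test_input → Spec_solve test_input (solve test_input)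

-- ===== LEMMAS AND PROOFS =====

-- 'front'/'back' deques balanced as A's balance() leaves them
def Bal (f b : List Int) : Prop := f.length ≤ b.length ∧ b.length ≤ f.length + 1

theorem bal1_concat (b f : List Int) : (bal1 f b).1 ++ (bal1 f b).2 = f ++ b := by
  induction b generalizing f with
  | nil => simp [bal1]
  | cons x bt ih =>
      simp only [bal1]
      split
      · rw [ih]; simp
      · rfl

theorem bal1_le (b f : List Int) : (bal1 f b).2.length ≤ (bal1 f b).1.length + 1 := by
  induction b generalizing f with
  | nil => simp [bal1]
  | cons x bt ih =>
      simp only [bal1]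
      split
      · exact ih _
      · simp_all

theorem bal2_spec (f b : List Int) (h : b.length ≤ f.length + 1) :
    (bal2 f b).1 ++ (bal2 f b).2 = f ++ b ∧ Bal (bal2 f b).1 (bal2 f b).2 := by
  unfold bal2
  split
  · rename_i hlt
    have hf : f ≠ [] := by intro h0; simp [h0] at hlt
    have := bal2_spec f.dropLast (f.getLastD 0 :: b)
      (by simp [List.length_dropLast]; omega)
    rcases this with ⟨hc, hb⟩
    refine ⟨?_, hb⟩
    rw [hc]
    have : f.dropLast ++ [f.getLastD 0] = f := by
      rw [List.getLastD_eq_getLast?, List.getLast?_eq_some_getLast hf]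
      exact List.dropLast_concat_getLast hf
    calc f.dropLast ++ (f.getLastD 0 :: b) = (f.dropLast ++ [f.getLastD 0]) ++ b := by simp
    _ = f ++ b := by rw [this]
  · rename_i hge
    exact ⟨rfl, by refine ⟨by simpa using Nat.le_of_not_lt (by simpa using hge), by simpa using h⟩⟩
  termination_by f.length
  decreasing_by simp [List.length_dropLast]; omega

theorem balance_spec (f b : List Int) :
    (balance f b).1 ++ (balance f b).2 = f ++ b ∧ Bal (balance f b).1 (balance f b).2 := by
  unfold balance
  rcases bal2_spec (bal1 f b).1 (bal1 f b).2 (bal1_le b f) with ⟨hc, hb⟩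
  exact ⟨by rw [hc, bal1_concat], hb⟩

def PVRel (st : List Int × List Int × List (Option Int)) (st' : List Int × List (Option Int)) : Prop :=
  st.1 ++ st.2.1 = st'.1 ∧ Bal st.1 st.2.1 ∧ st.2.2 = st'.2

theorem flen_eq (f b : List Int) (h : Bal f b) : f.length = (f ++ b).length / 2 := by
  rcases h with ⟨h1, h2⟩; simp; omega

theorem stepA_rel (ops : List String) (vals : List (List Int)) (st : List Int × List Int × List (Option Int))
    (st' : List Int × List (Option Int)) (i : Int) (h : PVRel st st') :
    PVRel (stepA ops vals st i) (stepB ops vals st' i) := by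
  obtain ⟨f, b, ans⟩ := st
  obtain ⟨q, ans'⟩ := st'
  obtain ⟨hq, hbal, hans⟩ := h
  simp only at hq hbal hans
  subst hq hans
  obtain ⟨hb1, hb2⟩ := hbal
  have hnil : (f ++ b = ([] : List Int)) ↔ (f = [] ∧ b = []) := List.append_eq_nil_iff
  simp only [stepA, stepB]
  generalize pvVal vals i = v
  generalize (PySem.List.pyGet? ops i).getD "" = op
  have hlen : (f ++ b).length = f.length + b.length := by simp
  by_cases h1 : op = "pushFront"
  · simp only [h1, String.reduceEq, reduceIte, if_true]
    exact ⟨by rw [(balance_spec (v :: f) b).1, PySem.List.insert_zero]; rfl,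
      (balance_spec (v :: f) b).2, rfl⟩
  by_cases h2 : op = "pushMiddle"
  · simp only [h2, String.reduceEq, reduceIte, if_true]
    have hfl : f.length = (f ++ b).length / 2 := flen_eq f b ⟨hb1, hb2⟩
    have hidx : PySem.Int.floordiv (((f ++ b).length : Int)) 2 = (((f ++ b).length / 2 : Nat) : Int) := by
      exact_mod_cast PySem.Int.floordiv_natCast (f ++ b).length 2
    refine ⟨?_, (balance_spec (f ++ [v]) b).2, rfl⟩
    rw [(balance_spec (f ++ [v]) b).1, hidx,
      PySem.List.insert_natCast _ _ _ (Nat.div_le_self _ _), ← hfl,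
      List.take_left, List.drop_left]
    simp
  by_cases h3 : op = "pushBack"
  · simp only [h3, String.reduceEq, reduceIte, if_true]
    exact ⟨by rw [(balance_spec f (b ++ [v])).1, List.append_assoc],
      (balance_spec f (b ++ [v])).2, rfl⟩
  by_cases h4 : op = "popFront"
  · simp only [h4, String.reduceEq, reduceIte, if_true]
    by_cases he : f = [] ∧ b = []
    · obtain ⟨rfl, rfl⟩ := he
      simp [PVRel, Bal]
    · have hqne : f ++ b ≠ [] := fun h0 => he (hnil.mp h0)
      rw [if_neg he, if_neg hqne]
      by_cases hf : f = []
      · subst hf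
        have hbne : b ≠ [] := fun h0 => he ⟨rfl, h0⟩
        obtain ⟨y, bt, rfl⟩ := List.exists_cons_of_ne_nil hbne
        simp only [ne_eq, not_true_eq_false, reduceIte, List.nil_append,
          PySem.List.pop?_zero_cons, Option.getD_some, List.tail_cons]
        exact ⟨(balance_spec [] bt).1, (balance_spec [] bt).2, by simp⟩
      · obtain ⟨x, ft, rfl⟩ := List.exists_cons_of_ne_nil hf
        simp only [ne_eq, reduceCtorEq, not_false_eq_true, reduceIte, List.cons_append,
          PySem.List.pop?_zero_cons, Option.getD_some, List.tail_cons, List.headD_cons]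
        exact ⟨(balance_spec ft b).1, (balance_spec ft b).2, rfl⟩
  by_cases h5 : op = "popMiddle"
  · simp only [h5, String.reduceEq, reduceIte, if_true]
    by_cases he : f = [] ∧ b = []
    · obtain ⟨rfl, rfl⟩ := he
      simp [PVRel, Bal]
    · have hqne : f ++ b ≠ [] := fun h0 => he (hnil.mp h0)
      rw [if_neg he, if_neg hqne]
      have hn1 : 1 ≤ (f ++ b).length := List.length_pos_of_ne_nil hqne
      have hone : (((f ++ b).length : Int) - 1) = (((f ++ b).length - 1 : Nat) : Int) := by omega
      have hidx : PySem.Int.floordiv (((f ++ b).length : Int) - 1) 2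
          = ((((f ++ b).length - 1) / 2 : Nat) : Int) := by
        rw [hone]; exact_mod_cast PySem.Int.floordiv_natCast ((f ++ b).length - 1) 2
      by_cases hc : b.length ≤ f.length
      · have hfb : f.length = b.length := le_antisymm hb1 hc
        have hf : f ≠ [] := by
          intro h0
          exact he ⟨h0, List.eq_nil_of_length_eq_zero (by simp [h0] at hfb; omega)⟩
        have hi : ((f ++ b).length - 1) / 2 = f.length - 1 := by omega
        have hfl1 : 1 ≤ f.length := List.length_pos_of_ne_nil hf
        rw [if_pos hc, hidx, hi, PySem.List.pop?_natCast _ _ (by omega)]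
        refine ⟨?_, (balance_spec f.dropLast b).2, ?_⟩
        · rw [(balance_spec f.dropLast b).1]
          simp only [Option.getD_some]
          rw [List.eraseIdx_append_of_lt_length (by omega), List.eraseIdx_length_sub_one]
        · simp only [Option.getD_some]
          congr 2
          rw [List.getElem_append_left (by omega), List.getLastD_eq_getLast?,
            List.getLast?_eq_some_getLast hf]
          simp [List.getLast_eq_getElem]
      · have hbne : b ≠ [] := by
          intro h0; simp [h0] at hc
        obtain ⟨y, bt, rfl⟩ := List.exists_cons_of_ne_nil hbne
        have hi : ((f ++ y :: bt).length - 1) / 2 = f.length := by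
          simp only [List.length_append, List.length_cons] at hc hb2 ⊢; omega
        rw [if_neg hc, hidx, hi, PySem.List.pop?_natCast _ _ (by simp)]
        refine ⟨?_, (balance_spec f (y :: bt).tail).2, ?_⟩
        · rw [(balance_spec f (y :: bt).tail).1]
          simp only [Option.getD_some]
          rw [List.eraseIdx_append_of_length_le (le_refl _)]
          simp
        · simp only [Option.getD_some]
          congr 2
          rw [List.getElem_append_right (le_refl _)]
          simp
  · simp only [h1, h2, h3, h4, h5, reduceIte]
    by_cases he : f = [] ∧ b = []
    · obtain ⟨rfl, rfl⟩ := he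
      simp [PVRel, Bal]
    · have hqne : f ++ b ≠ [] := fun h0 => he (hnil.mp h0)
      rw [if_neg he, if_neg hqne]
      have hbne : b ≠ [] := by
        intro h0
        subst h0
        simp only [List.length_nil, Nat.le_zero] at hb1
        exact he ⟨List.eq_nil_of_length_eq_zero hb1, rfl⟩
      rw [if_pos hbne]
      have hq : f ++ b = (f ++ b.dropLast) ++ [b.getLast hbne] := by
        conv_lhs => rw [← List.dropLast_append_getLast (l := b) hbne]
        rw [← List.append_assoc]
      rw [hq, PySem.List.pop?_last]
      refine ⟨?_, (balance_spec f b.dropLast).2, ?_⟩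
      · rw [(balance_spec f b.dropLast).1]
        simp
      · simp only [Option.getD_some]
        congr 2
        rw [List.getLastD_eq_getLast?, List.getLast?_eq_some_getLast hbne]
        rfl

theorem foldl_rel (ops : List String) (vals : List (List Int)) (l : List Int)
    (st : List Int × List Int × List (Option Int)) (st' : List Int × List (Option Int)) (h : PVRel st st') :
    PVRel (l.foldl (stepA ops vals) st) (l.foldl (stepB ops vals) st') := by
  induction l generalizing st st' with
  | nil => exact h
  | cons x xs ih => exact ih _ _ (stepA_rel ops vals st st' x h)

-- ===== VERDICT (by name: the statement is the Claim_ definition above) =====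
theorem solve_spec : Claim_equal_solve := by
  intro t _ _
  unfold Spec_solve solve solve_alt
  exact (foldl_rel t.1 t.2 _ ([], [], [none]) ([], [none]) ⟨rfl, ⟨le_refl _, by simp⟩, rfl⟩).2.2
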